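-- pv_equiv track=rewrite | github.com/rafiamb/2048-mcts-expectimax | mcts.py | board_predicates
-- ===== SOURCE A (Python) =====
-- def board_predicates(board):
--     """Extracts heuristic predicates used during rollouts."""
--     size = len(board)
--     preds = {}
--     max_tile = max(max(row) for row in board)
--     preds['max_in_corner'] = int(max_tile in (board[0][0], board[0][-1], board[-1][0], board[-1][-1]))
--     preds['empty_count'] = sum(cell == 0 for row in board for cell in row)
--     row_mono = sum(all(row[i] <= row[i+1] for i in range(size-1)) for row in board)
--     col_mono = sum(all(board[i][j] <= board[i+1][j] for i in range(size-1)) for j in range(size))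
--     preds['monotonic_rows'] = row_mono
--     preds['monotonic_cols'] = col_mono
--     return preds
-- ===== SOURCE B (Python) =====
-- def board_predicates(board):
--     """Extracts heuristic predicates used during rollouts (single-pass)."""
--     size = len(board)
--     max_tile = None
--     zeros = 0
--     row_mono = 0
--     col_flags = [True] * size
--     prev = None
--     for row in board:
--         m = max(row)
--         if max_tile is None or m > max_tile:
--             max_tile = m
--         for cell in row:
--             if cell == 0:
--                 zeros += 1
--         if all(a <= b for a, b in zip(row, row[1:size])):
--             row_mono += 1
--         if prev is not None:
--             col_flags = [f and p <= c for f, p, c in zip(col_flags, prev, row)]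
--         prev = row
--     first, last = board[0], board[-1]
--     corner = int(max_tile in (first[0], first[-1], last[0], last[-1]))
--     return {'max_in_corner': corner,
--             'empty_count': zeros,
--             'monotonic_rows': row_mono,
--             'monotonic_cols': sum(col_flags)}
-- ===== Notes on version B (the rewrite author's own statement) =====
-- stated objective: alternative
-- what changed: B computes all four predicates in a single traversal of the rows, tracking a running maximum, a zero counter, a row-monotonicity counter via pairwise zip, and per-column non-decreasing flags updated against the previous row, instead of A's four separate passes with nested index loops.
import Mathlib
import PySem

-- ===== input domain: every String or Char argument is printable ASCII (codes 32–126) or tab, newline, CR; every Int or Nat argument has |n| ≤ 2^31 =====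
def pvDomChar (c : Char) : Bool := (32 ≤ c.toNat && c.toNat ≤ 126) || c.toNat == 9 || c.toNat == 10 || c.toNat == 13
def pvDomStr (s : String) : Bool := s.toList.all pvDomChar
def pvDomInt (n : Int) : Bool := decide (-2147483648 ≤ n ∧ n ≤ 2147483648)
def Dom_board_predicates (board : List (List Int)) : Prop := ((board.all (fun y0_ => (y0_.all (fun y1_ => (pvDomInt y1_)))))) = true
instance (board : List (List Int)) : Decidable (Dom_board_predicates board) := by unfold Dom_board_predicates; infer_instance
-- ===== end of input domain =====

-- B computes all four heuristics in ONE traversal of the rows (running max, zero counter,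
-- pairwise row-monotonicity test, per-column flags against the previous row); A makes
-- separate passes with nested index loops.

-- ===== PORT A =====
-- board[i][j] with a default (indices are in range under Pre_)
def cellA (board : List (List Int)) (i j : Int) : Int :=
  PySem.List.pyGetD (PySem.List.pyGetD board i []) j 0

def board_predicates (board : List (List Int)) : List (String × Int) :=
  let size : Int := board.length
  let max_tile : Int :=
    (PySem.List.max? (board.map (fun row => (PySem.List.max? row (fun x => x)).getD 0))
      (fun x => x)).getD 0
  let max_in_corner : Int :=
    if max_tile = cellA board 0 0 ∨ max_tile = cellA board 0 (-1) ∨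
       max_tile = cellA board (-1) 0 ∨ max_tile = cellA board (-1) (-1) then 1 else 0
  let empty_count : Int :=
    board.foldl (fun acc row => row.foldl (fun a c => a + (if c = 0 then 1 else 0)) acc) 0
  let row_mono : Int :=
    board.foldl (fun acc row =>
      acc + (if (PySem.List.pyRange 0 (size - 1) 1).all
          (fun i => decide (PySem.List.pyGetD row i 0 ≤ PySem.List.pyGetD row (i + 1) 0))
        then 1 else 0)) 0
  let col_mono : Int :=
    (PySem.List.pyRange 0 size 1).foldl (fun acc j =>
      acc + (if (PySem.List.pyRange 0 (size - 1) 1).all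
          (fun i => decide (cellA board i j ≤ cellA board (i + 1) j))
        then 1 else 0)) 0
  [("max_in_corner", max_in_corner), ("empty_count", empty_count),
   ("monotonic_rows", row_mono), ("monotonic_cols", col_mono)]

-- ===== PORT B =====
-- the single for-loop of Source B, as a structural recursion over the rows with accumulators
def loopB (size : Int) : List (List Int) → Option Int → Int → Int → List Bool →
    Option (List Int) → Option Int × Int × Int × List Bool
  | [], maxT, zeros, rowMono, flags, _ => (maxT, zeros, rowMono, flags)
  | row :: rest, maxT, zeros, rowMono, flags, prev =>
      let m := (PySem.List.max? row (fun x => x)).getD 0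
      let maxT' := match maxT with
        | none => some m
        | some M => if M < m then some m else some M
      let zeros' := row.foldl (fun z c => if c = 0 then z + 1 else z) zeros
      let rowMono' :=
        if (row.zip (PySem.List.slice row (some 1) (some size))).all
            (fun p => decide (p.1 ≤ p.2))
        then rowMono + 1 else rowMono
      let flags' := match prev with
        | none => flags
        | some pr => (flags.zip (pr.zip row)).map (fun t => t.1 && decide (t.2.1 ≤ t.2.2))
      loopB size rest maxT' zeros' rowMono' flags' (some row)

def board_predicates_alt (board : List (List Int)) : List (String × Int) :=
  let size : Int := board.length
  let st := loopB size board none 0 0 (List.replicate board.length true) none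
  let max_tile : Int := st.1.getD 0
  let first := PySem.List.pyGetD board 0 []
  let last := PySem.List.pyGetD board (-1) []
  let corner : Int :=
    if max_tile = PySem.List.pyGetD first 0 0 ∨ max_tile = PySem.List.pyGetD first (-1) 0 ∨
       max_tile = PySem.List.pyGetD last 0 0 ∨ max_tile = PySem.List.pyGetD last (-1) 0
    then 1 else 0
  [("max_in_corner", corner), ("empty_count", st.2.1),
   ("monotonic_rows", st.2.2.1),
   ("monotonic_cols", st.2.2.2.foldl (fun s f => s + (if f then 1 else 0)) 0)]

-- ===== PRECONDITION & SPEC =====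
-- Pre_ excludes the empty board and boards with a row shorter than the number of rows:
-- there A's nested max()/indexing raises (ValueError/IndexError), except on a few ragged
-- boards where short-circuit evaluation happens to dodge the IndexError — an accident of
-- evaluation order, not a specified value.
def Pre_board_predicates (board : List (List Int)) : Prop :=
  board ≠ [] ∧ ∀ row ∈ board, board.length ≤ row.length
instance (board : List (List Int)) : Decidable (Pre_board_predicates board) := by
  unfold Pre_board_predicates; infer_instance

def pvWitness_board_predicates : List (List Int) := [[2, 0], [0, 4]]

def Spec_board_predicates (board : List (List Int)) (out : List (String × Int)) : Prop :=
  out = board_predicates_alt board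
instance (board : List (List Int)) (out : List (String × Int)) :
    Decidable (Spec_board_predicates board out) := by unfold Spec_board_predicates; infer_instance

-- ===== CLAIM (what is proved, stated in full; the proofs are below) =====
def Claim_equal_board_predicates : Prop := ∀ (board : List (List Int)),
  Dom_board_predicates board → Pre_board_predicates board →
  Spec_board_predicates board (board_predicates board)

-- ===== LEMMAS AND PROOFS =====

theorem sum_map_zero_one (row : List Int) :
    (row.map (fun c => if c = 0 then (1 : Int) else 0)).sum
      = ((row.countP (fun c => decide (c = 0)) : Nat) : Int) := by
  rw [show (fun c : Int => if c = 0 then (1 : Int) else 0)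
      = fun c => if (fun c : Int => decide (c = 0)) c = true then 1 else 0 from by
    funext c; simp]
  exact PySem.List.sum_map_ite_one_zero _ row

theorem getD_replicate_true (n j : Nat) : (List.replicate n true).getD j true = true := by
  rcases Nat.lt_or_ge j n with h | h
  · simp [List.getD, List.getElem?_replicate, h]
  · simp [List.getD, List.getElem?_replicate, Nat.not_lt.mpr h]

theorem if_lt_eq_max (M m : Int) : (if M < m then some m else some M) = some (max M m) := by
  rw [max_def]; split <;> split <;> simp_all <;> omega

theorem loopB_max (size : Int) (rest : List (List Int)) (M zeros rowMono : Int)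
    (flags : List Bool) (prev : Option (List Int)) :
    (loopB size rest (some M) zeros rowMono flags prev).1 =
      some ((rest.map (fun row => (PySem.List.max? row (fun x => x)).getD 0)).foldl max M) := by
  induction rest generalizing M zeros rowMono flags prev with
  | nil => rfl
  | cons row rest ih =>
      simp only [loopB, List.map_cons, List.foldl_cons, if_lt_eq_max]; exact ih _ _ _ _ _

theorem loopB_zeros (size : Int) (rest : List (List Int)) (maxT : Option Int)
    (zeros rowMono : Int) (flags : List Bool) (prev : Option (List Int)) :
    (loopB size rest maxT zeros rowMono flags prev).2.1 =
      zeros + ((rest.map (fun row => ((row.countP (fun c => c = 0) : Nat) : Int))).sum) := by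
  induction rest generalizing maxT zeros rowMono flags prev with
  | nil => simp [loopB]
  | cons row rest ih =>
      simp only [loopB, List.map_cons, List.sum_cons, ih,
        PySem.List.foldl_ite_add_one]
      ring

theorem loopB_rowMono (size : Int) (rest : List (List Int)) (maxT : Option Int)
    (zeros rowMono : Int) (flags : List Bool) (prev : Option (List Int)) :
    (loopB size rest maxT zeros rowMono flags prev).2.2.1 =
      rowMono + ((rest.countP (fun row =>
        (row.zip (PySem.List.slice row (some 1) (some size))).all
          (fun p => decide (p.1 ≤ p.2))) : Nat) : Int) := by
  induction rest generalizing maxT zeros rowMono flags prev with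
  | nil => simp [loopB]
  | cons row rest ih =>
      simp only [loopB, ih, List.countP_cons]
      split <;> simp_all <;> push_cast <;> ring

theorem getD_range_self (xs : List Bool) : (List.range xs.length).map (fun j => xs.getD j true) = xs := by
  apply List.ext_getElem
  · simp
  · intro i h1 h2
    simp [List.getElem?_eq_getElem h2]

theorem loopB_flags (size : Int) (n : Nat) (rest : List (List Int)) (pr : List Int)
    (maxT : Option Int) (zeros rowMono : Int) (flags : List Bool)
    (hpr : n ≤ pr.length) (hrest : ∀ r ∈ rest, n ≤ r.length) (hf : flags.length = n) :
    (loopB size rest maxT zeros rowMono flags (some pr)).2.2.2 =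
      (List.range n).map (fun j =>
        flags.getD j true &&
        decide (List.IsChain (fun p c : List Int => p.getD j 0 ≤ c.getD j 0) (pr :: rest))) := by
  induction rest generalizing pr maxT zeros rowMono flags with
  | nil =>
      simp only [loopB, List.isChain_singleton, decide_true, Bool.and_true]
      rw [← hf, getD_range_self]
  | cons row rest ih =>
      have hrow : n ≤ row.length := hrest row (by simp)
      have hrest' : ∀ r ∈ rest, n ≤ r.length := fun r hr => hrest r (by simp [hr])
      simp only [loopB]
      rw [ih row _ _ _ _ hrow hrest' (by simp; omega)]
      apply List.map_congr_left
      intro j hj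
      rw [List.mem_range] at hj
      have h1 : j < (flags.zip (pr.zip row)).length := by simp; omega
      rw [List.getD_eq_getElem _ _ (by simpa using h1), List.getElem_map, List.getElem_zip,
          List.getElem_zip, List.getD_eq_getElem _ _ (by omega)]
      simp only [List.isChain_cons_cons, Bool.decide_and]
      simp only [List.getD_eq_getElem pr 0 (by omega : j < pr.length),
                 List.getD_eq_getElem row 0 (by omega : j < row.length)]
      cases hfj : flags[j] <;> simp [Bool.decide_and]

theorem rowCond_eq (n : Nat) (hn : 1 ≤ n) (row : List Int) (h : n ≤ row.length) :
    ((PySem.List.pyRange 0 ((n : Int) - 1) 1).all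
        (fun i => decide (PySem.List.pyGetD row i 0 ≤ PySem.List.pyGetD row (i + 1) 0)))
    = ((row.zip (PySem.List.slice row (some 1) (some (n : Int)))).all
        (fun p => decide (p.1 ≤ p.2))) := by
  rw [PySem.List.slice_toNat row (by omega) (by omega)]
  rw [Bool.eq_iff_iff, List.all_eq_true, List.all_eq_true]
  have hlen : ((row.drop (1 : Int).toNat).take ((n : Int).toNat - (1 : Int).toNat)).length
      = n - 1 := by simp; omega
  constructor
  · intro H p hp
    obtain ⟨k, hk, rfl⟩ := List.mem_iff_getElem.mp hp
    have hk' : k < n - 1 := by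
      have := hk; rw [List.length_zip, hlen] at this; omega
    have := H ((k : Int)) (by
      rw [PySem.List.mem_pyRange_one]; constructor
      · exact Int.natCast_nonneg k
      · omega)
    simp only [List.getElem_zip, List.getElem_take, List.getElem_drop]
    simp only [decide_eq_true_eq] at this ⊢
    have e1 : PySem.List.pyGetD row ((k : Int)) 0 = row[k]'(by omega) := by
      rw [PySem.List.pyGetD_eq_getElem _ _ (by omega) (by push_cast; omega)]; simp
    have e2 : PySem.List.pyGetD row ((k : Int) + 1) 0 = row[(1:Int).toNat + k]'(by simp; omega) := by
      rw [PySem.List.pyGetD_eq_getElem _ _ (by omega) (by push_cast; omega)]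
      congr 1; omega
    rw [e1, e2] at this; exact this
  · intro H i hi
    rw [PySem.List.mem_pyRange_one] at hi
    have hk : i.toNat < n - 1 := by omega
    have hz : i.toNat < (row.zip ((row.drop (1 : Int).toNat).take ((n : Int).toNat - (1 : Int).toNat))).length := by
      rw [List.length_zip, hlen]; omega
    have := H _ (List.getElem_mem hz)
    simp only [List.getElem_zip, List.getElem_take, List.getElem_drop,
      decide_eq_true_eq] at this
    simp only [decide_eq_true_eq]
    have e1 : PySem.List.pyGetD row i 0 = row[i.toNat]'(by omega) := by
      rw [PySem.List.pyGetD_eq_getElem _ _ (by omega) (by omega)]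
    have e2 : PySem.List.pyGetD row (i + 1) 0 = row[(1:Int).toNat + i.toNat]'(by simp; omega) := by
      rw [PySem.List.pyGetD_eq_getElem _ _ (by omega) (by push_cast; omega)]
      congr 1; omega
    rw [e1, e2]; exact this

theorem colCond_eq (board : List (List Int)) (j : Nat) :
    ((PySem.List.pyRange 0 ((board.length : Int) - 1) 1).all
        (fun i => decide (cellA board i (j : Int) ≤ cellA board (i + 1) (j : Int))))
    = decide (List.IsChain (fun p c : List Int => p.getD j 0 ≤ c.getD j 0) board) := by
  rw [Bool.eq_iff_iff, List.all_eq_true, decide_eq_true_eq, List.isChain_iff_getElem]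
  constructor
  · intro H i hi
    have := H (i : Int) (by rw [PySem.List.mem_pyRange_one]; omega)
    simp only [decide_eq_true_eq, cellA] at this
    rw [PySem.List.pyGetD_eq_getElem board [] (by omega) (by push_cast; omega)] at this
    rw [show ((i : Int) + 1) = ((i + 1 : Nat) : Int) by push_cast; ring] at this
    rw [PySem.List.pyGetD_eq_getElem board [] (by omega) (by push_cast; omega)] at this
    simpa using this
  · intro H i hi
    rw [PySem.List.mem_pyRange_one] at hi
    simp only [decide_eq_true_eq, cellA]
    rw [PySem.List.pyGetD_eq_getElem board [] (by omega) (by omega)]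
    rw [show (i + 1) = ((i.toNat + 1 : Nat) : Int) by omega]
    rw [PySem.List.pyGetD_eq_getElem board [] (by omega) (by push_cast; omega)]
    have := H i.toNat (by omega)
    simp only [PySem.List.pyGetD_natCast, Int.toNat_natCast, List.getD] at this ⊢
    exact this

-- ===== VERDICT (by name: the statement is the Claim_ definition above) =====
theorem board_predicates_spec : Claim_equal_board_predicates := by
  unfold Claim_equal_board_predicates
  intro board _ hPre
  obtain ⟨hne, hlen⟩ := hPre
  unfold Spec_board_predicates
  cases board with
  | nil => exact absurd rfl hne
  | cons r0 rs =>
    have hr0 : rs.length + 1 ≤ r0.length := by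
      simpa using hlen r0 (by simp)
    have hrs : ∀ r ∈ rs, rs.length + 1 ≤ r.length := by
      intro r hr; simpa using hlen r (by simp [hr])
    simp only [board_predicates, board_predicates_alt, loopB]
    rw [List.map_cons, PySem.List.max?_id_cons]
    rw [loopB_zeros, loopB_rowMono,
        loopB_flags _ (rs.length + 1) rs r0 _ _ _ _ hr0 hrs (by simp)]
    simp only [loopB_max, Option.getD_some, List.cons.injEq, Prod.mk.injEq, true_and, and_true]
    refine ⟨?_, ?_, ?_, ?_⟩
    · -- max_in_corner
      simp only [cellA]
      rfl
    · -- empty_count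
      simp only [PySem.List.foldl_add, PySem.List.foldl_ite_add_one, List.map_cons,
        List.sum_cons, sum_map_zero_one]
      ring
    · -- monotonic_rows
      simp only [PySem.List.foldl_add]
      rw [PySem.List.sum_map_ite_one_zero
        (fun x : List Int => (PySem.List.pyRange 0 ((((r0 :: rs).length : Nat) : Int) - 1)).all
          fun i => decide (PySem.List.pyGetD x i 0 ≤ PySem.List.pyGetD x (i + 1) 0)) (r0 :: rs)]
      rw [List.countP_congr (q := fun row : List Int =>
            (row.zip (PySem.List.slice row (some 1) (some (((r0 :: rs).length : Nat) : Int)))).all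
              (fun p => decide (p.1 ≤ p.2)))
          (fun row hr => by
            rw [rowCond_eq ((r0 :: rs).length) (by simp) row (hlen row hr)])]
      rw [List.countP_cons]
      by_cases h : ((r0.zip (PySem.List.slice r0 (some 1) (some (((r0 :: rs).length : Nat) : Int)))).all
          (fun p => decide (p.1 ≤ p.2))) = true
      · simp only [h, if_true]; push_cast; ring
      · simp only [h]; push_cast; ring
    · -- monotonic_cols
      simp only [PySem.List.foldl_add]
      rw [PySem.List.sum_map_ite_one_zero
        (fun j : Int => (PySem.List.pyRange 0 ((((r0 :: rs).length : Nat) : Int) - 1)).all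
          fun i => decide (cellA (r0 :: rs) i j ≤ cellA (r0 :: rs) (i + 1) j))
        (PySem.List.pyRange 0 (((r0 :: rs).length : Nat) : Int))]
      rw [PySem.List.sum_map_ite_one_zero (fun f : Bool => f)
        ((List.range (rs.length + 1)).map (fun j =>
          (List.replicate (r0 :: rs).length true).getD j true &&
            decide (List.IsChain (fun p c : List Int => p.getD j 0 ≤ c.getD j 0) (r0 :: rs))))]
      rw [PySem.List.pyRange_zero_nat ((r0 :: rs).length), List.countP_map, List.countP_map]
      congr 2
      apply List.countP_congr
      intro j hj
      simp only [Function.comp_apply]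
      rw [colCond_eq (r0 :: rs) j, getD_replicate_true, Bool.true_and]
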